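-- pv_equiv track=rewrite | github.com/VictorJames11/Workshop-Project | src/simulated_city/routing.py | compute_reroute
-- ===== SOURCE A (Python) =====
-- from collections import deque
--
-- def compute_reroute(
--     graph_adjacency: dict[str, tuple[str, ...]],
--     origin: str,
--     destination: str,
--     blocked_segments: set[int],
--     segment_node_pairs: dict[int, tuple[str, str]],
-- ) -> list[str] | None:
--     """Compute shortest-by-hops path while avoiding blocked segments."""
--
--     if origin == destination:
--         return [origin]
--
--     blocked_edges = {
--         frozenset(segment_node_pairs[segment_id])
--         for segment_id in blocked_segments
--         if segment_id in segment_node_pairs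
--     }
--
--     queue: deque[tuple[str, list[str]]] = deque([(origin, [origin])])
--     visited = {origin}
--
--     while queue:
--         current_node, path = queue.popleft()
--
--         for neighbor in graph_adjacency.get(current_node, ()):
--             if frozenset((current_node, neighbor)) in blocked_edges:
--                 continue
--
--             if neighbor == destination:
--                 return [*path, neighbor]
--
--             if neighbor in visited:
--                 continue
--
--             visited.add(neighbor)
--             queue.append((neighbor, [*path, neighbor]))
--
--     return None
-- ===== SOURCE B (Python) =====
-- def compute_reroute(
--     graph_adjacency,
--     origin,
--     destination,
--     blocked_segments,
--     segment_node_pairs,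
-- ):
--     """Shortest-by-hops path avoiding blocked segments, computed level by level:
--     each round first checks whether any frontier node has the destination among
--     its allowed neighbors (reconstructing the path from parent pointers if so),
--     then expands the whole frontier into the next one."""
--     if origin == destination:
--         return [origin]
--
--     blocked = set()
--     for segment_id in blocked_segments:
--         pair = segment_node_pairs.get(segment_id)
--         if pair is not None:
--             blocked.add(frozenset(pair))
--
--     def allowed(u):
--         return [v for v in graph_adjacency.get(u, ()) if frozenset((u, v)) not in blocked]
--
--     parent = {}
--     visited = {origin}
--     frontier = [origin]
--
--     while frontier:
--         hit = next((u for u in frontier if destination in allowed(u)), None)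
--         if hit is not None:
--             path = [destination]
--             node = hit
--             while node != origin:
--                 path.append(node)
--                 node = parent[node]
--             path.append(origin)
--             path.reverse()
--             return path
--         nxt = []
--         for u in frontier:
--             for v in allowed(u):
--                 if v not in visited:
--                     visited.add(v)
--                     parent[v] = u
--                     nxt.append(v)
--         frontier = nxt
--
--     return None
-- ===== Notes on version B (the rewrite author's own statement) =====
-- stated objective: alternative
-- what changed: A's BFS keeps a full copy of the path inside every queue entry and copies it again at each enqueue; B does a level-by-level BFS over frontier lists with a parent-pointer dictionary (per level: one scan that looks for the destination among allowed neighbors, then one expansion pass), reconstructing the path once at the end.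
import Mathlib
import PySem

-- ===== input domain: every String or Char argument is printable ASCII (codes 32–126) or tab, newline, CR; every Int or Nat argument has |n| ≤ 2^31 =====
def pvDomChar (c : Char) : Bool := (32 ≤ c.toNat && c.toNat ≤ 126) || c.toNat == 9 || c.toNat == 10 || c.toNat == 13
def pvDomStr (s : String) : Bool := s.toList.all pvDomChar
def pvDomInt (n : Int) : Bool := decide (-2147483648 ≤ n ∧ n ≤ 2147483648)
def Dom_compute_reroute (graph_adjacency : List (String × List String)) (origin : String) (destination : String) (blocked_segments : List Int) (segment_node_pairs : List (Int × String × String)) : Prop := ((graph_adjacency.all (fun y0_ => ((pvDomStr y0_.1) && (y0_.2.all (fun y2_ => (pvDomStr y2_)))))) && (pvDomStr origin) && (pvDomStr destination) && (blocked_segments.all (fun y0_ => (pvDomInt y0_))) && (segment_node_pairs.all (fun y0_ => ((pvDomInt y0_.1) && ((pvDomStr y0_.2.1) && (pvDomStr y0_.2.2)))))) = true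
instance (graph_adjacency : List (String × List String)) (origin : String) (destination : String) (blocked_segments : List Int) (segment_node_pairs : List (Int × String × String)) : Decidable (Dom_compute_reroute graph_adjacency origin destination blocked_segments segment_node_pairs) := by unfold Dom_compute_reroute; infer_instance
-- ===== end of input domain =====

-- B replaces A's path-copying queue BFS by a level-by-level BFS over frontier lists with
-- parent pointers and a single path reconstruction; proved to return the same value always.

-- ===== PORT A =====
-- frozenset({a, b}) represented canonically as the sorted pair (exact: two frozensets of
-- ≤2 strings are equal iff their sorted pairs are; Python's min/max on str = Lean's ≤ on String)
def pvFrozen (a b : String) : String × String := if a ≤ b then (a, b) else (b, a)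

-- the blocked-edge set; both Pythons build it by the same lookups over blocked_segments
def pvBlocked (blocked_segments : List Int) (segment_node_pairs : List (Int × String × String)) : PySem.Set (String × String) :=
  blocked_segments.foldl (fun s sid =>
    match (PySem.Dict.mk segment_node_pairs).get? sid with
    | some (u, v) => PySem.Set.add s (pvFrozen u v)
    | none => s) PySem.Set.empty

-- A's inner 'for neighbor in …' loop: early return (inl) or updated (queue, visited) (inr)
def pvScanA (dest : String) (blocked : PySem.Set (String × String)) (cur : String) (path : List String) :
    List String → List (String × List String) → PySem.Set String →
    Sum (List String) (List (String × List String) × PySem.Set String)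
  | [], queue, visited => Sum.inr (queue, visited)
  | nb :: rest, queue, visited =>
    if PySem.Set.contains blocked (pvFrozen cur nb) then
      pvScanA dest blocked cur path rest queue visited
    else if nb = dest then Sum.inl (path ++ [nb])
    else if PySem.Set.contains visited nb then
      pvScanA dest blocked cur path rest queue visited
    else
      pvScanA dest blocked cur path rest (queue ++ [(nb, path ++ [nb])]) (PySem.Set.add visited nb)

-- A's 'while queue' loop. The fuel is only a totality guard: each iteration pops one entry,
-- each node is enqueued at most once, so pops ≤ 1 + Σ adjacency-list lengths < fuel.
def pvBfsA (g : PySem.Dict String (List String)) (dest : String) (blocked : PySem.Set (String × String)) :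
    Nat → List (String × List String) → PySem.Set String → Option (List String)
  | 0, _, _ => none
  | Nat.succ _, [], _ => none
  | Nat.succ fuel, (cur, path) :: queue, visited =>
    match pvScanA dest blocked cur path (g.getD cur []) queue visited with
    | Sum.inl res => some res
    | Sum.inr (queue', visited') => pvBfsA g dest blocked fuel queue' visited'

def compute_reroute (graph_adjacency : List (String × List String)) (origin : String) (destination : String) (blocked_segments : List Int) (segment_node_pairs : List (Int × String × String)) : Option (List String) :=
  if origin = destination then some [origin]
  else
    pvBfsA (PySem.Dict.mk graph_adjacency) destination
      (pvBlocked blocked_segments segment_node_pairs)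
      ((graph_adjacency.map (fun p => p.2.length)).sum + 2)
      [(origin, [origin])] (PySem.Set.ofList [origin])

-- ===== PORT B =====
-- B's helper allowed(u): the neighbors of u over unblocked edges
def pvAllowed (g : PySem.Dict String (List String)) (blocked : PySem.Set (String × String)) (u : String) : List String :=
  (g.getD u []).filter (fun v => !(PySem.Set.contains blocked (pvFrozen u v)))

-- B's reconstruction loop 'while node != origin: path.append(node); node = parent[node]'
-- followed by 'path.append(origin)'. Fuel = parent.size + 1 is only a totality guard
-- (the parent chain visits distinct keys); a missing key (Python KeyError, unreachable)
-- stops the walk.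
def pvTrace (origin : String) (parent : PySem.Dict String String) :
    Nat → String → List String → List String
  | 0, _, path => path
  | Nat.succ f, node, path =>
    if node = origin then path ++ [origin]
    else match parent.get? node with
      | some p => pvTrace origin parent f p (path ++ [node])
      | none => path

-- body of B's innermost loop: visit one allowed neighbor v of u
def pvVisit (u : String) (st : List String × PySem.Set String × PySem.Dict String String)
    (v : String) : List String × PySem.Set String × PySem.Dict String String :=
  if PySem.Set.contains st.2.1 v then st
  else (st.1 ++ [v], PySem.Set.add st.2.1 v, st.2.2.insert v u)

-- expansion of one frontier node u
def pvStep (g : PySem.Dict String (List String)) (blocked : PySem.Set (String × String))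
    (st : List String × PySem.Set String × PySem.Dict String String) (u : String) :
    List String × PySem.Set String × PySem.Dict String String :=
  (pvAllowed g blocked u).foldl (pvVisit u) st

-- B's 'while frontier' loop: per level, one scan for the destination, then one expansion
-- pass building the next frontier (fuel = a totality guard on the number of levels)
def pvLevel (g : PySem.Dict String (List String)) (origin dest : String) (blocked : PySem.Set (String × String)) :
    Nat → List String → PySem.Set String → PySem.Dict String String → Option (List String)
  | 0, _, _, _ => none
  | Nat.succ fuel, frontier, visited, parent =>
    if frontier.isEmpty then none
    else
      match frontier.find? (fun u => (pvAllowed g blocked u).contains dest) with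
      | some u => some ((pvTrace origin parent (parent.size + 1) u [dest]).reverse)
      | none =>
        match frontier.foldl (pvStep g blocked) ([], visited, parent) with
        | (nxt, visited', parent') => pvLevel g origin dest blocked fuel nxt visited' parent'

def compute_reroute_alt (graph_adjacency : List (String × List String)) (origin : String) (destination : String) (blocked_segments : List Int) (segment_node_pairs : List (Int × String × String)) : Option (List String) :=
  if origin = destination then some [origin]
  else
    pvLevel (PySem.Dict.mk graph_adjacency) origin destination
      (pvBlocked blocked_segments segment_node_pairs)
      ((graph_adjacency.map (fun p => p.2.length)).sum + 2)
      [origin] (PySem.Set.ofList [origin]) PySem.Dict.empty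

-- ===== PRECONDITION & SPEC =====
def Spec_compute_reroute (graph_adjacency : List (String × List String)) (origin : String) (destination : String) (blocked_segments : List Int) (segment_node_pairs : List (Int × String × String)) (out : Option (List String)) : Prop := out = compute_reroute_alt graph_adjacency origin destination blocked_segments segment_node_pairs
instance (graph_adjacency : List (String × List String)) (origin : String) (destination : String) (blocked_segments : List Int) (segment_node_pairs : List (Int × String × String)) (out : Option (List String)) : Decidable (Spec_compute_reroute graph_adjacency origin destination blocked_segments segment_node_pairs out) := by unfold Spec_compute_reroute; infer_instance

-- ===== CLAIM (what is proved, stated in full; the proofs are below) =====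
def Claim_equal_compute_reroute : Prop := ∀ (graph_adjacency : List (String × List String)) (origin : String) (destination : String) (blocked_segments : List Int) (segment_node_pairs : List (Int × String × String)), Dom_compute_reroute graph_adjacency origin destination blocked_segments segment_node_pairs → Spec_compute_reroute graph_adjacency origin destination blocked_segments segment_node_pairs (compute_reroute graph_adjacency origin destination blocked_segments segment_node_pairs)

-- ===== LEMMAS AND PROOFS =====

-- the chain of parent pointers from n (excluding n)
def pvChain (origin : String) (parent : PySem.Dict String String) : Nat → String → List String
  | 0, _ => []
  | Nat.succ f, node =>
    if node = origin then []
    else match parent.get? node with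
      | some p => p :: pvChain origin parent f p
      | none => []

-- invariant tied to each discovered node n with A's stored path p to it
def pvQInv (origin : String) (visited : PySem.Set String) (parent : PySem.Dict String String)
    (n : String) (p : List String) : Prop :=
  p.Nodup ∧ (∀ x ∈ p, x ∈ visited) ∧ p.head? = some origin ∧
  ∀ F, p.length ≤ F → n :: pvChain origin parent F n = p.reverse

-- the global invariant of the search state
def pvInv (origin : String) (visited : PySem.Set String) (parent : PySem.Dict String String)
    (es : List (String × List String)) : Prop :=
  visited = origin :: parent.keys ∧ visited.Nodup ∧
  ∀ pr ∈ es, pvQInv origin visited parent pr.1 pr.2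

-- fuel accounting: how many adjacency occurrences are still undiscovered
def pvSlack (allN : List String) (visited : PySem.Set String) : Nat :=
  allN.countP (fun v => !(PySem.Set.contains visited v))

theorem pvNotContains_not_mem {α : Type} [BEq α] [LawfulBEq α] (s : PySem.Set α) (x : α)
    (h : ¬ PySem.Set.contains s x = true) : x ∉ s := by
  simp only [PySem.Set.contains, List.contains_eq_mem, decide_eq_true_eq] at h
  exact h

theorem pvNodupLen (l l' : List String) (h : l.Nodup) (hs : l ⊆ l') :
    l.length ≤ l'.length := by
  calc l.length = l.toFinset.card := (List.toFinset_card_of_nodup h).symm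
    _ ≤ l'.toFinset.card := Finset.card_le_card (fun x hx => by
        simp only [List.mem_toFinset] at *; exact hs hx)
    _ ≤ l'.length := l'.toFinset_card_le

theorem pvNodupAppendSingleton (l : List String) (a : String) (h : l.Nodup) (ha : a ∉ l) :
    (l ++ [a]).Nodup :=
  List.Nodup.append h (List.nodup_singleton a) ((List.disjoint_singleton).mpr ha)

-- a Nodup list whose first and last elements coincide is a singleton
theorem pvHeadLast (p : List String) (a : String) (hnd : p.Nodup) (hh : p.head? = some a)
    (hl : p.getLast? = some a) : p = [a] := by
  cases p with
  | nil => simp at hh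
  | cons x t =>
    cases t with
    | nil => simp_all
    | cons y s =>
      exfalso
      have hx : x = a := by simpa using hh
      have hlast : (y :: s).getLast? = some a := by
        rw [← hl]; simp [List.getLast?_cons_cons]
      have hmem : a ∈ y :: s := List.mem_of_getLast? hlast
      rw [List.nodup_cons] at hnd
      exact hnd.1 (hx ▸ hmem)

-- B's reconstruction loop produces exactly A's stored path, reversed onto the accumulator
theorem pvTrace_spec (origin : String) (parent : PySem.Dict String String) :
    ∀ (F : Nat) (p : List String) (node : String) (acc : List String),
      p.Nodup → p.head? = some origin →
      (∀ G, p.length ≤ G → node :: pvChain origin parent G node = p.reverse) →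
      p.length ≤ F →
      pvTrace origin parent F node acc = acc ++ p.reverse := by
  intro F
  induction F with
  | zero =>
    intro p node acc _ hh _ hF
    cases p <;> simp_all
  | succ f ih =>
    intro p node acc hnd hh hspec hF
    have hne : p ≠ [] := by cases p <;> simp_all
    have hlast : p.getLast? = some node := by
      have h1 := hspec p.length le_rfl
      have h2 : p.reverse.head? = some node := by rw [← h1]; rfl
      rwa [List.head?_reverse] at h2
    by_cases ho : node = origin
    · have hp : p = [origin] := pvHeadLast p origin hnd hh (ho ▸ hlast)
      subst hp
      simp [pvTrace, ho]
    · obtain ⟨m, hm⟩ : ∃ m, p.length = m + 1 := by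
        cases p with
        | nil => simp_all
        | cons x t => exact ⟨t.length, by simp⟩
      have hspec1 := hspec p.length le_rfl
      rw [hm] at hspec1
      cases hq : parent.get? node with
      | none =>
        exfalso
        simp only [pvChain, ho, if_false, hq] at hspec1
        have hp : p = [node] := by
          have := congrArg List.reverse hspec1
          simpa using this.symm
        rw [hp] at hh
        simp at hh
        exact ho hh
      | some q =>
        simp only [pvChain, ho, if_false, hq] at hspec1
        have hp_eq : p = (q :: pvChain origin parent m q).reverse ++ [node] := by
          have := congrArg List.reverse hspec1
          simpa using this.symm
        have hdrop : p.dropLast.reverse = q :: pvChain origin parent m q := by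
          rw [hp_eq, List.dropLast_concat, List.reverse_reverse]
        have hrev : p.reverse = node :: p.dropLast.reverse := by
          rw [← hspec1, hdrop]
        have hspec' : ∀ G, p.dropLast.length ≤ G →
            q :: pvChain origin parent G q = p.dropLast.reverse := by
          intro G hG
          have hlen : p.length ≤ G + 1 := by
            rw [hm]; rw [List.length_dropLast, hm] at hG; omega
          have hsp := hspec (G + 1) hlen
          simp only [pvChain, ho, if_false, hq] at hsp
          rw [hrev] at hsp
          exact List.cons_injective hsp
        have h2 : 2 ≤ p.length := by
          have := congrArg List.length hp_eq
          simp at this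
          omega
        have hh' : p.dropLast.head? = some origin := by
          cases p with
          | nil => simp at h2
          | cons x t =>
            cases t with
            | nil => simp at h2
            | cons y s => simpa using hh
        have hnd' : p.dropLast.Nodup := hnd.sublist (List.dropLast_sublist p)
        have hF' : p.dropLast.length ≤ f := by
          rw [List.length_dropLast, hm]; rw [hm] at hF; omega
        have hih := ih p.dropLast q (acc ++ [node]) hnd' hh' hspec' hF'
        simp only [pvTrace, ho, if_false, hq]
        rw [hih, hrev]
        simp


-- inserting a key not in visited does not change a chain whose nodes all lie in visited
theorem pvChain_insert_fresh (origin nb cur0 : String) (visited : List String)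
    (parent : PySem.Dict String String) (hnb : nb ∉ visited) :
    ∀ (F : Nat) (n : String) (p : List String), (∀ x ∈ p, x ∈ visited) →
      n :: pvChain origin parent F n = p.reverse →
      n :: pvChain origin (parent.insert nb cur0) F n = p.reverse := by
  intro F
  induction F with
  | zero => intro n p _ h; simpa [pvChain] using h
  | succ f ih =>
    intro n p hsub h
    have hn_mem : n ∈ p := by
      have : n ∈ p.reverse := by rw [← h]; exact List.mem_cons_self
      simpa using this
    have hne : n ≠ nb := fun e => hnb (e ▸ hsub n hn_mem)
    by_cases ho : n = origin
    · simpa [pvChain, ho] using (by simpa [pvChain, ho] using h)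
    · have hget : (parent.insert nb cur0).get? n = parent.get? n :=
        PySem.Dict.get?_insert_of_ne parent cur0 hne
      cases hp : parent.get? n with
      | none =>
        simp only [pvChain, ho, if_false] at h ⊢
        rw [hget, hp]
        simpa [hp] using h
      | some q =>
        simp only [pvChain, ho, if_false, hp] at h
        have hrev : p.reverse = n :: q :: pvChain origin parent f q := h.symm
        have hdrop : p.dropLast.reverse = q :: pvChain origin parent f q := by
          have : p = (q :: pvChain origin parent f q).reverse ++ [n] := by
            have := congrArg List.reverse hrev
            simpa using this
          rw [this, List.dropLast_concat, List.reverse_reverse]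
        have hsub' : ∀ x ∈ p.dropLast, x ∈ visited := fun x hx =>
          hsub x (List.dropLast_subset _ hx)
        have := ih q p.dropLast hsub' hdrop.symm
        have hchains : q :: pvChain origin (parent.insert nb cur0) f q
            = q :: pvChain origin parent f q := this.trans hdrop
        have hc : pvChain origin (parent.insert nb cur0) f q = pvChain origin parent f q :=
          List.cons_injective hchains
        simp only [pvChain, ho, if_false, hget, hp, hc]
        exact h

-- discovering a fresh adjacency occurrence strictly decreases the slack
theorem pvSlack_add (allN : List String) (vis : PySem.Set String) (v : String)
    (hv : v ∈ allN) (hnv : v ∉ vis) :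
    pvSlack allN (vis ++ [v]) + 1 ≤ pvSlack allN vis := by
  simp only [pvSlack, PySem.Set.contains, List.contains_eq_mem]
  induction allN with
  | nil => simp at hv
  | cons a t ih =>
    simp only [List.countP_cons]
    have hmono : t.countP (fun x => !decide (x ∈ vis ++ [v]))
        ≤ t.countP (fun x => !decide (x ∈ vis)) := by
      apply List.countP_mono_left
      intro x _ hx
      simp only [Bool.not_eq_true', decide_eq_false_iff_not, List.mem_append,
        List.mem_singleton] at hx ⊢
      exact fun hmem => hx (Or.inl hmem)
    by_cases hav : a = v
    · subst hav
      have h1 : (!decide (a ∈ vis ++ [a])) = false := by simp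
      have h2 : (!decide (a ∈ vis)) = true := by simp [hnv]
      simp only [h1, h2]
      simp only [Bool.false_eq_true, if_false, if_true]
      omega
    · have hvt : v ∈ t := by
        rcases List.mem_cons.mp hv with h | h
        · exact absurd h.symm hav
        · exact h
      have hsame : (!decide (a ∈ vis ++ [v])) = (!decide (a ∈ vis)) := by
        simp [List.mem_append, hav]
      rw [hsame]
      have := ih hvt
      omega

-- A's inner loop returns the extended path as soon as the destination is an allowed neighbor
theorem pvScanA_dest (dest : String) (blocked : PySem.Set (String × String)) (cur : String)
    (path : List String) :
    ∀ (nbs : List String) (queue : List (String × List String)) (visited : PySem.Set String),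
      dest ∈ nbs.filter (fun v => !(PySem.Set.contains blocked (pvFrozen cur v))) →
      pvScanA dest blocked cur path nbs queue visited = Sum.inl (path ++ [dest]) := by
  intro nbs
  induction nbs with
  | nil => intro queue visited h; simp at h
  | cons nb rest ih =>
    intro queue visited h
    rw [List.filter_cons] at h
    by_cases hb : PySem.Set.contains blocked (pvFrozen cur nb) = true
    · rw [if_neg (by rw [hb]; simp)] at h
      simp only [pvScanA, hb, if_true]
      exact ih _ _ h
    · have hbf : PySem.Set.contains blocked (pvFrozen cur nb) = false := Bool.eq_false_iff.mpr hb
      rw [if_pos (by rw [hbf]; rfl)] at h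
      by_cases hd : nb = dest
      · subst hd
        have hbm : pvFrozen cur nb ∉ blocked := pvNotContains_not_mem blocked _ hb
        simp [pvScanA, hbm]
      · have hrest : dest ∈ rest.filter (fun v => !(PySem.Set.contains blocked (pvFrozen cur v))) := by
          rcases List.mem_cons.mp h with h1 | h1
          · exact absurd h1.symm hd
          · exact h1
        by_cases hv : PySem.Set.contains visited nb = true
        · simp only [pvScanA, hbf, Bool.false_eq_true, if_false, hd, hv, if_true]
          exact ih _ _ hrest
        · have hvf : PySem.Set.contains visited nb = false := Bool.eq_false_iff.mpr hv
          simp only [pvScanA, hbf, hvf, Bool.false_eq_true, if_false, hd]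
          exact ih _ _ hrest

-- when the destination is not an allowed neighbor, A's inner loop and B's expansion of one
-- frontier node produce matching states, preserving the invariant and the slack accounting
theorem pvScan_expand (origin dest : String) (blocked : PySem.Set (String × String))
    (allN : List String) (cur : String) (path : List String) :
    ∀ (nbs : List String) (queue : List (String × List String)) (visited : PySem.Set String)
      (parent : PySem.Dict String String) (nxt : List String),
      (∀ x ∈ nbs, x ∈ allN) →
      pvInv origin visited parent ((cur, path) :: queue) →
      dest ∉ nbs.filter (fun v => !(PySem.Set.contains blocked (pvFrozen cur v))) →
      ∃ Δ visited' parent',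
        pvScanA dest blocked cur path nbs queue visited = Sum.inr (queue ++ Δ, visited') ∧
        (nbs.filter (fun v => !(PySem.Set.contains blocked (pvFrozen cur v)))).foldl (pvVisit cur)
            (nxt, visited, parent) = (nxt ++ Δ.map Prod.fst, visited', parent') ∧
        pvInv origin visited' parent' ((cur, path) :: (queue ++ Δ)) ∧
        Δ.length + pvSlack allN visited' ≤ pvSlack allN visited := by
  intro nbs
  induction nbs with
  | nil =>
    intro queue visited parent nxt _ hinv _
    exact ⟨[], visited, parent, by simp [pvScanA], by simp, by simpa using hinv, by simp⟩
  | cons nb rest ih =>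
    intro queue visited parent nxt hsub hinv hno
    have hsubr : ∀ x ∈ rest, x ∈ allN := fun x hx => hsub x (List.mem_cons_of_mem _ hx)
    by_cases hb : PySem.Set.contains blocked (pvFrozen cur nb) = true
    · simp only [pvScanA, hb, if_true]
      have hfilter : (nb :: rest).filter (fun v => !(PySem.Set.contains blocked (pvFrozen cur v)))
          = rest.filter (fun v => !(PySem.Set.contains blocked (pvFrozen cur v))) := by
        rw [List.filter_cons, if_neg (by rw [hb]; simp)]
      have hno' : dest ∉ rest.filter (fun v => !(PySem.Set.contains blocked (pvFrozen cur v))) := by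
        rw [← hfilter]; exact hno
      rw [hfilter]
      exact ih queue visited parent nxt hsubr hinv hno'
    · have hbf : PySem.Set.contains blocked (pvFrozen cur nb) = false := Bool.eq_false_iff.mpr hb
      have hfilter : (nb :: rest).filter (fun v => !(PySem.Set.contains blocked (pvFrozen cur v)))
          = nb :: rest.filter (fun v => !(PySem.Set.contains blocked (pvFrozen cur v))) := by
        rw [List.filter_cons, if_pos (by rw [hbf]; rfl)]
      have hd : nb ≠ dest := by
        intro e; apply hno; rw [hfilter, e]; exact List.mem_cons_self
      have hno' : dest ∉ rest.filter (fun v => !(PySem.Set.contains blocked (pvFrozen cur v))) := by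
        rw [hfilter] at hno; exact fun h => hno (List.mem_cons_of_mem _ h)
      obtain ⟨hv, hnd, hq⟩ := hinv
      by_cases hvn : PySem.Set.contains visited nb = true
      · simp only [pvScanA, hbf, hd, hvn, Bool.false_eq_true, if_false, if_true]
        rw [hfilter]
        have hvm : nb ∈ visited := by
          simpa [PySem.Set.contains, List.contains_eq_mem] using hvn
        have hstep : pvVisit cur (nxt, visited, parent) nb = (nxt, visited, parent) := by
          simp [pvVisit, hvm]
        rw [List.foldl_cons, hstep]
        exact ih queue visited parent nxt hsubr ⟨hv, hnd, hq⟩ hno'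
      · -- fresh neighbor
        have hvf : PySem.Set.contains visited nb = false := Bool.eq_false_iff.mpr hvn
        have hnmem : nb ∉ visited := pvNotContains_not_mem visited nb hvn
        have hvadd : PySem.Set.add visited nb = visited ++ [nb] :=
          PySem.Set.add_of_not_mem hnmem
        have hnkeys : nb ∉ parent.keys := fun hmem =>
          hnmem (by rw [hv]; exact List.mem_cons_of_mem _ hmem)
        have hcontains : parent.contains nb = false := by
          cases hc : parent.contains nb with
          | false => rfl
          | true => exact absurd ((PySem.Dict.contains_iff_mem_keys parent nb).1 hc) hnkeys
        have hkeys : (parent.insert nb cur).keys = parent.keys ++ [nb] :=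
          PySem.Dict.keys_insert_of_not_contains parent cur hcontains
        have hv' : PySem.Set.add visited nb = origin :: (parent.insert nb cur).keys := by
          rw [hvadd, hv, hkeys]; rfl
        have hnd' : (PySem.Set.add visited nb).Nodup := by
          rw [hvadd]; exact pvNodupAppendSingleton _ _ hnd hnmem
        have hmemadd : ∀ x ∈ visited, x ∈ PySem.Set.add visited nb := by
          intro x hx; rw [hvadd]; exact List.mem_append_left _ hx
        have hpres : ∀ n p, pvQInv origin visited parent n p →
            pvQInv origin (PySem.Set.add visited nb) (parent.insert nb cur) n p := by
          rintro n p ⟨h1, h2, h3, h4⟩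
          refine ⟨h1, fun x hx => hmemadd x (h2 x hx), h3, ?_⟩
          intro F hF
          exact pvChain_insert_fresh origin nb cur visited parent hnmem F n p h2 (h4 F hF)
        have hcur := hq (cur, path) List.mem_cons_self
        have hnbnew : pvQInv origin (PySem.Set.add visited nb) (parent.insert nb cur)
            nb (path ++ [nb]) := by
          obtain ⟨hp1, hp2, hp3, -⟩ := hq (cur, path) List.mem_cons_self
          have hpne : path ≠ [] := by cases path <;> simp_all
          refine ⟨?_, ?_, ?_, ?_⟩
          · exact pvNodupAppendSingleton _ _ hp1 (fun hmem => hnmem (hp2 nb hmem))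
          · intro x hx
            rcases List.mem_append.1 hx with hx | hx
            · exact hmemadd x (hp2 x hx)
            · rw [hvadd]; exact List.mem_append_right _ hx
          · cases path with
            | nil => exact absurd rfl hpne
            | cons a t => simpa using hp3
          · intro F hF
            simp only [List.length_append, List.length_cons, List.length_nil] at hF
            cases F with
            | zero => omega
            | succ f =>
              have hnbo : nb ≠ origin := fun e => hnmem (by rw [hv, e]; exact List.mem_cons_self)
              have hget : (parent.insert nb cur).get? nb = some cur :=
                PySem.Dict.get?_insert_self parent nb cur
              have hcurspec := (hpres cur path hcur).2.2.2 f (by omega)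
              simp only [pvChain, hnbo, if_false, hget]
              rw [hcurspec]
              simp
        have hq' : ∀ pr ∈ (queue ++ [(nb, path ++ [nb])]),
            pvQInv origin (PySem.Set.add visited nb) (parent.insert nb cur) pr.1 pr.2 := by
          intro pr hpr
          rcases List.mem_append.1 hpr with hpr | hpr
          · exact hpres pr.1 pr.2 (hq pr (List.mem_cons_of_mem _ hpr))
          · simp only [List.mem_singleton] at hpr
            rw [hpr]; exact hnbnew
        have hinv' : pvInv origin (PySem.Set.add visited nb) (parent.insert nb cur)
            ((cur, path) :: (queue ++ [(nb, path ++ [nb])])) := by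
          refine ⟨hv', hnd', ?_⟩
          intro pr hpr
          rcases List.mem_cons.1 hpr with hpr | hpr
          · rw [hpr]; exact hpres cur path hcur
          · exact hq' pr hpr
        obtain ⟨Δ', visited'', parent'', hA, hB, hI, hS⟩ :=
          ih (queue ++ [(nb, path ++ [nb])]) (PySem.Set.add visited nb) (parent.insert nb cur)
            (nxt ++ [nb]) hsubr hinv' hno'
        refine ⟨(nb, path ++ [nb]) :: Δ', visited'', parent'', ?_, ?_, ?_, ?_⟩
        · simp only [pvScanA, hbf, hd, hvf, Bool.false_eq_true, if_false]
          rw [hA]; simp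
        · rw [hfilter, List.foldl_cons]
          have hstep : pvVisit cur (nxt, visited, parent) nb
              = (nxt ++ [nb], PySem.Set.add visited nb, parent.insert nb cur) := by
            simp [pvVisit, hnmem]
          rw [hstep, hB]; simp
        · simpa using hI
        · have hdec : pvSlack allN (PySem.Set.add visited nb) + 1 ≤ pvSlack allN visited := by
            rw [hvadd]
            exact pvSlack_add allN visited nb (hsub nb List.mem_cons_self) hnmem
          simp only [List.length_cons]
          omega

-- first frontier entry reaching the destination: A returns its stored path plus the destination
theorem pvC1 (g : PySem.Dict String (List String)) (origin dest : String)
    (blocked : PySem.Set (String × String)) (allN : List String)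
    (hsub : ∀ c, ∀ x ∈ g.getD c [], x ∈ allN) :
    ∀ (fp ne : List (String × List String)) (visited : PySem.Set String)
      (parent : PySem.Dict String String) (u : String) (pu : List String) (f : Nat),
      pvInv origin visited parent (fp ++ ne) →
      fp.find? (fun pr => (pvAllowed g blocked pr.1).contains dest) = some (u, pu) →
      fp.length ≤ f →
      pvBfsA g dest blocked f (fp ++ ne) visited = some (pu ++ [dest]) := by
  intro fp
  induction fp with
  | nil => intro ne visited parent u pu f _ hfind _; simp at hfind
  | cons e rest ih =>
    intro ne visited parent u pu f hinv hfind hf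
    obtain ⟨c, p⟩ := e
    obtain ⟨f', rfl⟩ : ∃ f', f = f' + 1 := ⟨f - 1, by simp at hf; omega⟩
    by_cases hc : ((pvAllowed g blocked c).contains dest) = true
    · simp only [List.find?_cons, hc, Option.some.injEq, Prod.mk.injEq] at hfind
      obtain ⟨rfl, rfl⟩ := hfind
      have hmem : dest ∈ pvAllowed g blocked c := by
        simpa [List.contains_eq_mem] using hc
      show pvBfsA g dest blocked (f' + 1) ((c, p) :: (rest ++ ne)) visited = _
      simp only [pvBfsA]
      rw [pvScanA_dest dest blocked c p (g.getD c []) (rest ++ ne) visited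
        (by simpa [pvAllowed] using hmem)]
    · have hcf : ((pvAllowed g blocked c).contains dest) = false := Bool.eq_false_iff.mpr hc
      simp only [List.find?_cons, hcf] at hfind
      have hno : dest ∉ (g.getD c []).filter
          (fun v => !(PySem.Set.contains blocked (pvFrozen c v))) := by
        intro hmem
        exact hc (by simpa [pvAllowed, List.contains_eq_mem] using hmem)
      have hinv0 : pvInv origin visited parent ((c, p) :: (rest ++ ne)) := by
        simpa using hinv
      obtain ⟨Δ, visited', parent', hA, -, hI, -⟩ :=
        pvScan_expand origin dest blocked allN c p (g.getD c []) (rest ++ ne) visited parent []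
          (fun x hx => hsub c x hx) hinv0 hno
      show pvBfsA g dest blocked (f' + 1) ((c, p) :: (rest ++ ne)) visited = _
      simp only [pvBfsA]
      rw [hA]
      have hinv' : pvInv origin visited' parent' (rest ++ (ne ++ Δ)) := by
        obtain ⟨h1, h2, h3⟩ := hI
        exact ⟨h1, h2, fun pr hpr => h3 pr (by
          simp only [List.mem_cons, List.mem_append] at hpr ⊢
          tauto)⟩
      have hrec := ih (ne ++ Δ) visited' parent' u pu f' hinv' hfind (by simp at hf; omega)
      simpa [List.append_assoc] using hrec

-- no frontier entry reaches the destination: A consumes the level and continues on exactly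
-- the next frontier that B's expansion pass computes
theorem pvC2 (g : PySem.Dict String (List String)) (origin dest : String)
    (blocked : PySem.Set (String × String)) (allN : List String)
    (hsub : ∀ c, ∀ x ∈ g.getD c [], x ∈ allN) :
    ∀ (fp ne : List (String × List String)) (visited : PySem.Set String)
      (parent : PySem.Dict String String),
      pvInv origin visited parent (fp ++ ne) →
      (∀ pr ∈ fp, ((pvAllowed g blocked pr.1).contains dest) = false) →
      ∃ Δ visited' parent',
        (∀ r : Nat, pvBfsA g dest blocked (fp.length + r) (fp ++ ne) visited
          = pvBfsA g dest blocked r (ne ++ Δ) visited') ∧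
        (fp.map Prod.fst).foldl (pvStep g blocked) (ne.map Prod.fst, visited, parent)
          = ((ne ++ Δ).map Prod.fst, visited', parent') ∧
        pvInv origin visited' parent' (ne ++ Δ) ∧
        Δ.length + pvSlack allN visited' ≤ pvSlack allN visited := by
  intro fp
  induction fp with
  | nil =>
    intro ne visited parent hinv _
    exact ⟨[], visited, parent, fun r => by simp, by simp, by simpa using hinv, by simp⟩
  | cons e rest ih =>
    intro ne visited parent hinv hnone
    obtain ⟨c, p⟩ := e
    have hno : dest ∉ (g.getD c []).filter
        (fun v => !(PySem.Set.contains blocked (pvFrozen c v))) := by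
      intro hmem
      have h1 : dest ∈ pvAllowed g blocked c := by simpa [pvAllowed] using hmem
      have h2 : ((pvAllowed g blocked c).contains dest) = false :=
        hnone (c, p) List.mem_cons_self
      simp only [List.contains_eq_mem, decide_eq_false_iff_not] at h2
      exact h2 h1
    have hinv0 : pvInv origin visited parent ((c, p) :: (rest ++ ne)) := by simpa using hinv
    obtain ⟨Δ1, vis1, par1, hA1, hB1, hI1, hS1⟩ :=
      pvScan_expand origin dest blocked allN c p (g.getD c []) (rest ++ ne) visited parent
        (ne.map Prod.fst) (fun x hx => hsub c x hx) hinv0 hno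
    have hinv1 : pvInv origin vis1 par1 (rest ++ (ne ++ Δ1)) := by
      obtain ⟨h1, h2, h3⟩ := hI1
      exact ⟨h1, h2, fun pr hpr => h3 pr (by
        simp only [List.mem_cons, List.mem_append] at hpr ⊢; tauto)⟩
    obtain ⟨Δ2, vis2, par2, hA2, hB2, hI2, hS2⟩ :=
      ih (ne ++ Δ1) vis1 par1 hinv1 (fun pr hpr => hnone pr (List.mem_cons_of_mem _ hpr))
    refine ⟨Δ1 ++ Δ2, vis2, par2, ?_, ?_, ?_, ?_⟩
    · intro r
      have hlen : ((c, p) :: rest).length + r = (rest.length + r) + 1 := by simp; omega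
      rw [hlen]
      show pvBfsA g dest blocked ((rest.length + r) + 1) ((c, p) :: (rest ++ ne)) visited = _
      simp only [pvBfsA]
      rw [hA1]
      show pvBfsA g dest blocked (rest.length + r) ((rest ++ ne) ++ Δ1) vis1 = _
      rw [show (rest ++ ne) ++ Δ1 = rest ++ (ne ++ Δ1) from by simp, hA2 r]
      simp [List.append_assoc]
    · show (c :: rest.map Prod.fst).foldl (pvStep g blocked) (ne.map Prod.fst, visited, parent) = _
      rw [List.foldl_cons]
      have hstep : pvStep g blocked (ne.map Prod.fst, visited, parent) c
          = ((ne ++ Δ1).map Prod.fst, vis1, par1) := by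
        simp only [pvStep, pvAllowed]
        rw [hB1]; simp
      rw [hstep, hB2]
      simp [List.append_assoc]
    · simpa [List.append_assoc] using hI2
    · simp only [List.length_append]; omega

-- the main level-by-level simulation: A's queue BFS equals B's layered BFS
theorem pvMain (g : PySem.Dict String (List String)) (origin dest : String)
    (blocked : PySem.Set (String × String)) (allN : List String)
    (hsub : ∀ c, ∀ x ∈ g.getD c [], x ∈ allN) :
    ∀ (fb fa : Nat) (fp : List (String × List String)) (visited : PySem.Set String)
      (parent : PySem.Dict String String),
      pvInv origin visited parent fp →
      fp.length + pvSlack allN visited + 1 ≤ fa →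
      pvSlack allN visited + 2 ≤ fb →
      pvBfsA g dest blocked fa fp visited
        = pvLevel g origin dest blocked fb (fp.map Prod.fst) visited parent := by
  intro fb
  induction fb with
  | zero => intro fa fp visited parent _ _ hb; omega
  | succ f ih =>
    intro fa fp visited parent hinv hfa hfb
    cases fp with
    | nil =>
      obtain ⟨fa', rfl⟩ : ∃ fa', fa = fa' + 1 := ⟨fa - 1, by omega⟩
      rfl
    | cons e fp' =>
      have hne : ((e :: fp').map Prod.fst).isEmpty = false := by simp
      simp only [pvLevel, hne, Bool.false_eq_true, if_false]
      rw [List.find?_map]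
      rw [show ((fun u => (pvAllowed g blocked u).contains dest) ∘ Prod.fst)
          = (fun pr : String × List String => (pvAllowed g blocked pr.1).contains dest) from rfl]
      cases hfind : (e :: fp').find? (fun pr : String × List String => (pvAllowed g blocked pr.1).contains dest) with
      | some pr =>
        obtain ⟨u, pu⟩ := pr
        simp only [Option.map_some]
        have hmem := List.mem_of_find?_eq_some hfind
        obtain ⟨hv, hnd, hq⟩ := hinv
        obtain ⟨hp1, hp2, hp3, hp4⟩ := hq (u, pu) hmem
        have hApath : pvBfsA g dest blocked fa (e :: fp') visited = some (pu ++ [dest]) := by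
          have := pvC1 g origin dest blocked allN hsub (e :: fp') [] visited parent u pu fa
            (by rw [List.append_nil]; exact ⟨hv, hnd, hq⟩) hfind
            (by simp only [List.length_cons] at hfa ⊢; omega)
          simpa using this
        have hlen : pu.length ≤ parent.size + 1 := by
          have h1 : pu.length ≤ visited.length := pvNodupLen pu visited hp1 hp2
          have h2 : visited.length = parent.size + 1 := by
            rw [hv]; simp [PySem.Dict.keys, PySem.Dict.size]
          omega
        have htr := pvTrace_spec origin parent (parent.size + 1) pu u [dest] hp1 hp3 hp4 hlen
        rw [hApath, htr]
        simp
      | none =>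
        simp only [Option.map_none]
        have hnone : ∀ pr ∈ (e :: fp'), ((pvAllowed g blocked pr.1).contains dest) = false := by
          intro pr hpr
          have := List.find?_eq_none.mp hfind pr hpr
          simpa using this
        obtain ⟨Δ, vis', par', hA, hB, hI, hS⟩ :=
          pvC2 g origin dest blocked allN hsub (e :: fp') [] visited parent
            (by rw [List.append_nil]; exact hinv) hnone
        simp only [List.nil_append, List.append_nil] at hA hI
        have hBfold : ((e :: fp').map Prod.fst).foldl (pvStep g blocked) ([], visited, parent)
            = (Δ.map Prod.fst, vis', par') := by simpa using hB
        rw [hBfold]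
        show _ = pvLevel g origin dest blocked f (Δ.map Prod.fst) vis' par'
        have hfa' : fa = (e :: fp').length + (fa - (e :: fp').length) := by
          simp only [List.length_cons] at hfa ⊢; omega
        rw [hfa', hA (fa - (e :: fp').length)]
        cases hΔ : Δ with
        | nil =>
          subst hΔ
          obtain ⟨r', hr'⟩ : ∃ r', fa - (e :: fp').length = r' + 1 := by
            simp only [List.length_cons] at hfa ⊢
            exact ⟨fa - (fp'.length + 1) - 1, by omega⟩
          rw [hr']
          obtain ⟨f', rfl⟩ : ∃ f', f = f' + 1 := ⟨f - 1, by omega⟩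
          rfl
        | cons d Δ' =>
          rw [← hΔ]
          apply ih
          · exact hI
          · have : Δ.length ≥ 1 := by rw [hΔ]; simp
            simp only [List.length_cons] at hfa ⊢
            omega
          · have : Δ.length ≥ 1 := by rw [hΔ]; simp
            omega

-- the adjacency lists looked up by both ports live inside the flattened adjacency values
theorem pvGetD_subset (l : List (String × List String)) (c : String) :
    ∀ x ∈ (PySem.Dict.mk l).getD c [], x ∈ l.flatMap (fun p => p.2) := by
  unfold PySem.Dict.getD
  cases h : (PySem.Dict.mk l).get? c with
  | none => simp
  | some v =>
    have := PySem.Dict.mem_items_of_get?_eq_some (d := PySem.Dict.mk l) h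
    intro x hx
    exact List.mem_flatMap.2 ⟨(c, v), by simpa [PySem.Dict.items, PySem.Dict.mk] using this, hx⟩

-- ===== VERDICT (by name: the statement is the Claim_ definition above) =====
theorem compute_reroute_spec : Claim_equal_compute_reroute := by
  intro graph_adjacency origin destination blocked_segments segment_node_pairs _
  unfold Spec_compute_reroute compute_reroute compute_reroute_alt
  by_cases h : origin = destination
  · simp [h]
  · simp only [h, if_false]
    have hslack : pvSlack (graph_adjacency.flatMap (fun p => p.2)) (PySem.Set.ofList [origin])
        ≤ (graph_adjacency.map (fun p => p.2.length)).sum := by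
      calc pvSlack (graph_adjacency.flatMap (fun p => p.2)) (PySem.Set.ofList [origin])
          ≤ (graph_adjacency.flatMap (fun p => p.2)).length := List.countP_le_length
        _ = (graph_adjacency.map (fun p => p.2.length)).sum := by
            rw [List.length_flatMap]
    have := pvMain (PySem.Dict.mk graph_adjacency) origin destination
      (pvBlocked blocked_segments segment_node_pairs)
      (graph_adjacency.flatMap (fun p => p.2))
      (pvGetD_subset graph_adjacency)
      ((graph_adjacency.map (fun p => p.2.length)).sum + 2)
      ((graph_adjacency.map (fun p => p.2.length)).sum + 2)
      [(origin, [origin])] (PySem.Set.ofList [origin]) PySem.Dict.empty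
      ?_ (by simp only [List.length_cons, List.length_nil]; omega) (by omega)
    · simpa using this
    · refine ⟨by simp [PySem.Set.ofList, PySem.Set.add, PySem.Set.empty, PySem.Dict.keys, PySem.Dict.empty], by simp [PySem.Set.ofList, PySem.Set.add, PySem.Set.empty], ?_⟩
      intro pr hpr
      simp only [List.mem_singleton] at hpr
      rw [hpr]
      refine ⟨by simp, by simp [PySem.Set.ofList, PySem.Set.add, PySem.Set.empty], by simp, ?_⟩
      intro F hF
      simp only [List.length_cons, List.length_nil] at hF
      cases F with
      | zero => omega
      | succ f => simp [pvChain]
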